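-- pv_equiv track=rewrite | github.com/tomquinn8/Codewars | Pick_peaks.py | pick_peaks
-- ===== SOURCE A (Python) =====
-- def pick_peaks(arr):
--     retdict = dict()
--     retdict['pos'] = []
--     retdict['peaks'] = []
--     for item in enumerate(arr[1:-1], 1):
--         if arr[item[0]-1] < item[1] >= arr[item[0]+1]:
--             retdict['pos'].append(item[0])
--             retdict['peaks'].append(item[1])
--         if retdict['peaks'] and item[1] == arr[item[0]-1] and item[1] == retdict['peaks'][-1] and item[1] < arr[item[0]+1]:
--             retdict['pos'] = retdict['pos'][:-1]
--             retdict['peaks'] = retdict['peaks'][:-1]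
--     if retdict['peaks'] and arr[-1] == arr[-2] == retdict['peaks'][-1]:
--         retdict['pos'] = retdict['pos'][:-1]
--         retdict['peaks'] = retdict['peaks'][:-1]
--     return retdict
-- ===== SOURCE B (Python) =====
-- def pick_peaks(arr):
--     # Single forward pass: remember the last rising edge as (index, value);
--     # commit it as a peak only when a falling edge arrives.
--     pos, peaks = [], []
--     cand = None
--     for i, (prev, cur) in enumerate(zip(arr, arr[1:]), 1):
--         if cur > prev:
--             cand = (i, cur)
--         elif cur < prev:
--             if cand is not None:
--                 pos.append(cand[0])
--                 peaks.append(cand[1])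
--                 cand = None
--     return {'pos': pos, 'peaks': peaks}
-- ===== Notes on version B (the rewrite author's own statement) =====
-- stated objective: simpler
-- what changed: Replaces A's add-then-retract scheme (peaks appended on lookahead and later removed by an in-loop plateau retraction plus a trailing-plateau end correction) with a single state machine that remembers the last rising edge and commits a peak only when a falling edge arrives, so no retraction or end correction is needed.
import Mathlib
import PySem

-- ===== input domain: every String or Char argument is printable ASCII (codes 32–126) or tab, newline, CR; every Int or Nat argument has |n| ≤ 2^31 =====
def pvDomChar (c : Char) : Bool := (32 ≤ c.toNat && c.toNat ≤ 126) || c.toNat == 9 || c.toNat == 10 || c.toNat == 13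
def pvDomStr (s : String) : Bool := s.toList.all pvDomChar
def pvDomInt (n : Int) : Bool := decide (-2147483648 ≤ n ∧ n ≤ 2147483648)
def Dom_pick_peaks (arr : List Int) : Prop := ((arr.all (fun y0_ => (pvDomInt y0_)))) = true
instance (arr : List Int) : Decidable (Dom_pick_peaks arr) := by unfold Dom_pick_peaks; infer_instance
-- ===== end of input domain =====

-- B replaces A's add-then-retract peak detection (and its end correction) by a single
-- rising-edge/falling-edge state machine; objective: simpler, same cost.

-- ===== PORT A =====
-- A's retdict has exactly the fixed keys 'pos' and 'peaks'; it is carried as the pair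
-- (pos, peaks) and rendered as the association list at return (exact for this program).
def pick_peaks_step (arr : List Int) (st : List Int × List Int) (item : Int × Int) : List Int × List Int :=
  let st1 :=
    if PySem.List.pyGetD arr (item.1 - 1) 0 < item.2 ∧ item.2 ≥ PySem.List.pyGetD arr (item.1 + 1) 0 then
      (st.1 ++ [item.1], st.2 ++ [item.2])
    else st
  -- peaks[-1] is read only under the nonemptiness test, hence the getLast? = some form
  if st1.2 ≠ [] ∧ item.2 = PySem.List.pyGetD arr (item.1 - 1) 0 ∧ st1.2.getLast? = some item.2 ∧ item.2 < PySem.List.pyGetD arr (item.1 + 1) 0 then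
    (PySem.List.slice st1.1 none (some (-1)), PySem.List.slice st1.2 none (some (-1)))
  else st1

def pick_peaks (arr : List Int) : List (String × List Int) :=
  let st := (PySem.List.enumerate (PySem.List.slice arr (some 1) (some (-1))) 1).foldl (pick_peaks_step arr) ([], [])
  let st2 :=
    if st.2 ≠ [] ∧ PySem.List.pyGetD arr (-1) 0 = PySem.List.pyGetD arr (-2) 0 ∧ st.2.getLast? = some (PySem.List.pyGetD arr (-2) 0) then
      (PySem.List.slice st.1 none (some (-1)), PySem.List.slice st.2 none (some (-1)))
    else st
  [("pos", st2.1), ("peaks", st2.2)]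

-- ===== PORT B =====
def pick_peaks_loop (i : Int) (cand : Option (Int × Int)) (pos peaks : List Int) (prev : Int) : List Int → List Int × List Int
  | [] => (pos, peaks)
  | cur :: rest =>
    if cur > prev then pick_peaks_loop (i+1) (some (i, cur)) pos peaks cur rest
    else if cur < prev then
      match cand with
      | some c => pick_peaks_loop (i+1) none (pos ++ [c.1]) (peaks ++ [c.2]) cur rest
      | none => pick_peaks_loop (i+1) none pos peaks cur rest
    else pick_peaks_loop (i+1) cand pos peaks cur rest

def pick_peaks_alt (arr : List Int) : List (String × List Int) :=
  match arr with
  | [] => [("pos", []), ("peaks", [])]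
  | a :: rest =>
    let st := pick_peaks_loop 1 none [] [] a rest
    [("pos", st.1), ("peaks", st.2)]

-- ===== PRECONDITION & SPEC =====
def Spec_pick_peaks (arr : List Int) (out : List (String × List Int)) : Prop := out = pick_peaks_alt arr
instance (arr : List Int) (out : List (String × List Int)) : Decidable (Spec_pick_peaks arr out) := by unfold Spec_pick_peaks; infer_instance

-- ===== CLAIM (what is proved, stated in full; the proofs are below) =====
def Claim_equal_pick_peaks : Prop := ∀ (arr : List Int), Dom_pick_peaks arr → Spec_pick_peaks arr (pick_peaks arr)

-- ===== LEMMAS AND PROOFS =====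

-- Pure one-step function of A's loop body (lookups already resolved to prevv/x/y).
def stepP (prevv x y i : Int) (st : List Int × List Int) : List Int × List Int :=
  let st1 := if prevv < x ∧ x ≥ y then (st.1 ++ [i], st.2 ++ [x]) else st
  if st1.2 ≠ [] ∧ x = prevv ∧ st1.2.getLast? = some x ∧ x < y then (st1.1.dropLast, st1.2.dropLast) else st1

-- A's loop as a structural recursion.
def loopA (i prev : Int) : List Int → (List Int × List Int) → List Int × List Int
  | x :: y :: rest, st => loopA (i+1) x (y :: rest) (stepP prev x y i st)
  | _, st => st

-- A's end correction with arr[-2] = l2, arr[-1] = l1 resolved.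
def endFix (l2 l1 : Int) (st : List Int × List Int) : List Int × List Int :=
  if st.2 ≠ [] ∧ l1 = l2 ∧ st.2.getLast? = some l2 then (st.1.dropLast, st.2.dropLast) else st

-- Loop invariant: relation between A's state and B's (pos, peaks, cand) at a joint
-- recursion point with previous value `prev` and lookahead `x`.
def InvPP (x prev : Int) (pos peaks : List Int) (stA : List Int × List Int) : Option (Int × Int) → Prop
  | none => stA = (pos, peaks) ∧ (peaks = [] ∨ ∃ p, peaks.getLast? = some p ∧ prev < p)
  | some cv => cv.2 = prev ∧ stA = (if x ≤ cv.2 then (pos ++ [cv.1], peaks ++ [cv.2]) else (pos, peaks))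

lemma loopA_cons (i prev x y : Int) (rest : List Int) (st : List Int × List Int) :
    loopA i prev (x :: y :: rest) st = loopA (i+1) x (y :: rest) (stepP prev x y i st) := rfl

lemma loopA_one (i prev x : Int) (st : List Int × List Int) : loopA i prev [x] st = st := rfl

lemma loopA_nil (i prev : Int) (st : List Int × List Int) : loopA i prev [] st = st := rfl

lemma loopB_nil (i : Int) (cand : Option (Int × Int)) (pos peaks : List Int) (prev : Int) :
    pick_peaks_loop i cand pos peaks prev [] = (pos, peaks) := rfl

lemma loopB_cons (i : Int) (cand : Option (Int × Int)) (pos peaks : List Int) (prev cur : Int) (rest : List Int) :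
    pick_peaks_loop i cand pos peaks prev (cur :: rest) =
      (if cur > prev then pick_peaks_loop (i+1) (some (i, cur)) pos peaks cur rest
       else if cur < prev then
         match cand with
         | some c => pick_peaks_loop (i+1) none (pos ++ [c.1]) (peaks ++ [c.2]) cur rest
         | none => pick_peaks_loop (i+1) none pos peaks cur rest
       else pick_peaks_loop (i+1) cand pos peaks cur rest) := rfl

lemma slice_dropLast (xs : List Int) : PySem.List.slice xs none (some (-1)) = xs.dropLast :=
  PySem.List.slice_to_neg_one xs

lemma slice_one_negone (xs : List Int) :
    PySem.List.slice xs (some 1) (some (-1)) = xs.tail.dropLast := by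
  cases xs with
  | nil => simp [PySem.List.slice]
  | cons a t =>
    simp [PySem.List.slice, PySem.List.clampIdx, List.dropLast_eq_take]
    split_ifs <;> omega

lemma stepA_eval (pre : List Int) (prevv x y : Int) (suf : List Int) (st : List Int × List Int) :
    pick_peaks_step (pre ++ prevv :: x :: y :: suf) st ((pre.length : Int) + 1, x)
      = stepP prevv x y ((pre.length : Int) + 1) st := by
  have h1 : ((pre.length : Int) + 1) - 1 = ((pre.length : Nat) : Int) := by omega
  have h2 : ((pre.length : Int) + 1) + 1 = (((pre.length + 2 : Nat)) : Int) := by push_cast; omega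
  have g1 : PySem.List.pyGetD (pre ++ prevv :: x :: y :: suf) (((pre.length : Int) + 1) - 1) 0 = prevv := by
    rw [h1, PySem.List.pyGetD_natCast]
    simp [List.getD]
  have g2 : PySem.List.pyGetD (pre ++ prevv :: x :: y :: suf) (((pre.length : Int) + 1) + 1) 0 = y := by
    rw [h2, PySem.List.pyGetD_natCast]
    simp [List.getD]
  simp only [pick_peaks_step, stepP, g1, g2, slice_dropLast]

-- The fold of A's literal loop body over enumerate(arr[1:-1], 1), restricted to the part
-- after position pre.length, equals the structural loopA.
lemma bridgeA (xs : List Int) : ∀ (pre : List Int) (prevv : Int) (st : List Int × List Int),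
    (PySem.List.enumerate xs.dropLast ((pre.length : Int) + 1)).foldl
        (pick_peaks_step (pre ++ prevv :: xs)) st
      = loopA ((pre.length : Int) + 1) prevv xs st := by
  induction xs with
  | nil => intro pre prevv st; rw [loopA_nil]; simp [PySem.List.enumerate_nil]
  | cons x xs ih =>
    intro pre prevv st
    cases xs with
    | nil => rw [loopA_one]; simp [PySem.List.enumerate_nil]
    | cons y rest =>
      have hd : (x :: y :: rest).dropLast = x :: (y :: rest).dropLast := by
        simp [List.dropLast]
      rw [hd, PySem.List.enumerate_cons, List.foldl_cons]
      rw [stepA_eval pre prevv x y rest st]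
      have harr : pre ++ prevv :: x :: y :: rest = (pre ++ [prevv]) ++ x :: y :: rest := by simp
      have hlen : ((pre.length : Int) + 1) + 1 = (((pre ++ [prevv]).length : Int) + 1) := by
        simp
      rw [harr, hlen, ih (pre ++ [prevv]) x (stepP prevv x y ((pre.length : Int) + 1) st)]
      have hl2 : ((pre.length : Int) + 1) = (((pre ++ [prevv]).length : Int)) := by simp
      rw [loopA_cons, hl2]

-- stepP characterizations.
lemma stepP_rise (prevv x y i : Int) (st : List Int × List Int) (h : prevv < x) :
    stepP prevv x y i st = if y ≤ x then (st.1 ++ [i], st.2 ++ [x]) else st := by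
  simp only [stepP]
  by_cases hy : y ≤ x
  · rw [if_pos (show prevv < x ∧ x ≥ y from ⟨h, hy⟩)]
    have hc : ¬((st.1 ++ [i], st.2 ++ [x]).2 ≠ [] ∧ x = prevv ∧ (st.1 ++ [i], st.2 ++ [x]).2.getLast? = some x ∧ x < y) := by
      rintro ⟨-, hx2, -, -⟩; omega
    rw [if_neg hc, if_pos hy]
  · rw [if_neg (show ¬(prevv < x ∧ x ≥ y) by rintro ⟨-, h2⟩; omega)]
    have hc : ¬(st.2 ≠ [] ∧ x = prevv ∧ st.2.getLast? = some x ∧ x < y) := by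
      rintro ⟨-, hx2, -, -⟩; omega
    rw [if_neg hc, if_neg hy]

lemma stepP_norise (prevv x y i : Int) (st : List Int × List Int) (h : ¬ prevv < x) :
    stepP prevv x y i st =
      if st.2 ≠ [] ∧ x = prevv ∧ st.2.getLast? = some x ∧ x < y then (st.1.dropLast, st.2.dropLast) else st := by
  simp only [stepP]
  rw [if_neg (show ¬(prevv < x ∧ x ≥ y) by rintro ⟨h1, -⟩; omega)]

-- Core equivalence of the two loops under the invariant.
lemma core (xs : List Int) : ∀ (x prev i : Int) (pos peaks : List Int)
    (stA : List Int × List Int) (cand : Option (Int × Int)) (l1 l2 : Int),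
    InvPP x prev pos peaks stA cand →
    (prev :: x :: xs).getLast? = some l1 →
    (prev :: x :: xs).dropLast.getLast? = some l2 →
    endFix l2 l1 (loopA i prev (x :: xs) stA) = pick_peaks_loop i cand pos peaks prev (x :: xs) := by
  induction xs with
  | nil =>
    intro x prev i pos peaks stA cand l1 l2 hinv h1 h2
    have e1 : l1 = x := by simp at h1; omega
    have e2 : l2 = prev := by simp [List.dropLast] at h2; omega
    rw [e1, e2, loopA_one, loopB_cons]
    cases cand with
    | none =>
      obtain ⟨hst, hpk⟩ := hinv
      subst hst
      have hend : endFix prev x (pos, peaks) = (pos, peaks) := by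
        simp only [endFix]
        have hc : ¬((pos, peaks).2 ≠ [] ∧ x = prev ∧ (pos, peaks).2.getLast? = some prev) := by
          rintro ⟨hne, hx2, hpp⟩
          rcases hpk with hpk | ⟨p, hp, hlt2⟩
          · exact hne hpk
          · rw [hp] at hpp
            have : p = prev := by injection hpp
            omega
        rw [if_neg hc]
      rw [hend]
      split_ifs with hgt hlt
      · rw [loopB_nil]
      · rw [loopB_nil]
      · rw [loopB_nil]
    | some cv =>
      obtain ⟨hv, hst⟩ := hinv
      subst hst
      by_cases hgt : x > prev
      · rw [if_pos hgt, loopB_nil,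
           if_neg (show ¬ x ≤ cv.2 by omega)]
        simp only [endFix]
        rw [if_neg (show ¬((pos, peaks).2 ≠ [] ∧ x = prev ∧ (pos, peaks).2.getLast? = some prev) by
              rintro ⟨-, hx2, -⟩; omega)]
      · by_cases hlt : x < prev
        · rw [if_neg hgt, if_pos hlt, loopB_nil,
             if_pos (show x ≤ cv.2 by omega)]
          simp only [endFix]
          rw [if_neg (show ¬((pos ++ [cv.1], peaks ++ [cv.2]).2 ≠ [] ∧ x = prev ∧ (pos ++ [cv.1], peaks ++ [cv.2]).2.getLast? = some prev) by
                rintro ⟨-, hx2, -⟩; omega)]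
          rfl
        · have hxp : x = prev := by omega
          rw [if_neg hgt, if_neg hlt, loopB_nil,
             if_pos (show x ≤ cv.2 by omega)]
          simp only [endFix]
          rw [if_pos (show (pos ++ [cv.1], peaks ++ [cv.2]).2 ≠ [] ∧ x = prev ∧ (pos ++ [cv.1], peaks ++ [cv.2]).2.getLast? = some prev by
                refine ⟨by simp, hxp, by simp [hv]⟩)]
          simp
  | cons y rest ih =>
    intro x prev i pos peaks stA cand l1 l2 hinv h1 h2
    have h1' : (x :: y :: rest).getLast? = some l1 := by
      rwa [List.getLast?_cons_cons] at h1
    have h2' : (x :: y :: rest).dropLast.getLast? = some l2 := by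
      have hdl0 : (prev :: x :: y :: rest).dropLast = prev :: (x :: y :: rest).dropLast := by
        simp [List.dropLast]
      rw [hdl0] at h2
      have hne : (x :: y :: rest).dropLast ≠ [] := by simp [List.dropLast]
      cases hdl : (x :: y :: rest).dropLast with
      | nil => exact absurd hdl hne
      | cons a as => rw [hdl] at h2; rwa [List.getLast?_cons_cons] at h2
    rw [loopA_cons, loopB_cons]
    by_cases hgt : x > prev
    · rw [if_pos hgt]
      apply ih y x (i+1) pos peaks _ (some (i, x)) l1 l2 ?_ h1' h2'
      have hstA : stA = (pos, peaks) := by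
        cases cand with
        | none => exact hinv.1
        | some cv =>
          have hv := hinv.1
          rw [hinv.2, if_neg (show ¬ x ≤ cv.2 by omega)]
      subst hstA
      exact ⟨rfl, stepP_rise prev x y i (pos, peaks) hgt⟩
    · rw [if_neg hgt]
      by_cases hlt : x < prev
      · rw [if_pos hlt]
        cases cand with
        | none =>
          obtain ⟨hst, hpk⟩ := hinv
          subst hst
          apply ih y x (i+1) pos peaks _ none l1 l2 ?_ h1' h2'
          refine ⟨?_, ?_⟩
          · rw [stepP_norise prev x y i (pos, peaks) (by omega)]
            rw [if_neg ?_]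
            rintro ⟨hne, hx2, hpp, -⟩
            rcases hpk with hpk | ⟨p, hp, hlt2⟩
            · exact hne hpk
            · rw [hp] at hpp
              have : p = x := by injection hpp
              omega
          · rcases hpk with hpk | ⟨p, hp, hlt2⟩
            · exact Or.inl hpk
            · exact Or.inr ⟨p, hp, by omega⟩
        | some cv =>
          obtain ⟨hv, hst⟩ := hinv
          subst hst
          apply ih y x (i+1) (pos ++ [cv.1]) (peaks ++ [cv.2]) _ none l1 l2 ?_ h1' h2'
          refine ⟨?_, Or.inr ⟨cv.2, by simp, by omega⟩⟩
          rw [if_pos (show x ≤ cv.2 by omega)]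
          rw [stepP_norise prev x y i _ (by omega)]
          rw [if_neg ?_]
          rintro ⟨-, hx2, -, -⟩; omega
      · rw [if_neg hlt]
        have hxp : x = prev := by omega
        cases cand with
        | none =>
          obtain ⟨hst, hpk⟩ := hinv
          subst hst
          apply ih y x (i+1) pos peaks _ none l1 l2 ?_ h1' h2'
          refine ⟨?_, ?_⟩
          · rw [stepP_norise prev x y i (pos, peaks) (by omega)]
            rw [if_neg ?_]
            rintro ⟨hne, hx2, hpp, -⟩
            rcases hpk with hpk | ⟨p, hp, hlt2⟩
            · exact hne hpk
            · rw [hp] at hpp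
              have : p = x := by injection hpp
              omega
          · rcases hpk with hpk | ⟨p, hp, hlt2⟩
            · exact Or.inl hpk
            · exact Or.inr ⟨p, hp, by omega⟩
        | some cv =>
          obtain ⟨hv, hst⟩ := hinv
          subst hst
          apply ih y x (i+1) pos peaks _ (some cv) l1 l2 ?_ h1' h2'
          refine ⟨by omega, ?_⟩
          rw [if_pos (show x ≤ cv.2 by omega)]
          rw [stepP_norise prev x y i _ (by omega)]
          by_cases hy : x < y
          · rw [if_pos (show (pos ++ [cv.1], peaks ++ [cv.2]).2 ≠ [] ∧ x = prev ∧ (pos ++ [cv.1], peaks ++ [cv.2]).2.getLast? = some x ∧ x < y by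
                  exact ⟨by simp, hxp, by simp [hv, hxp], hy⟩)]
            rw [if_neg (show ¬ y ≤ cv.2 by omega)]
            simp
          · rw [if_neg (show ¬((pos ++ [cv.1], peaks ++ [cv.2]).2 ≠ [] ∧ x = prev ∧ (pos ++ [cv.1], peaks ++ [cv.2]).2.getLast? = some x ∧ x < y) by
                  rintro ⟨-, -, -, hc⟩; exact hy hc)]
            rw [if_pos (show y ≤ cv.2 by omega)]

-- ===== VERDICT (by name: the statement is the Claim_ definition above) =====
theorem pick_peaks_spec : Claim_equal_pick_peaks := by
  intro arr _
  unfold Spec_pick_peaks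
  rcases arr with _ | ⟨a, _ | ⟨x, xs⟩⟩
  · rfl
  · rfl
  · have hb := bridgeA (x :: xs) [] a ([], [])
    norm_num at hb
    have hne : (a :: x :: xs) ≠ [] := by simp
    obtain ⟨l1, h1⟩ : ∃ l1, (a :: x :: xs).getLast? = some l1 := by
      cases h : (a :: x :: xs).getLast? with
      | none => rw [List.getLast?_eq_none_iff] at h; exact absurd h hne
      | some v => exact ⟨v, rfl⟩
    obtain ⟨l2, h2⟩ : ∃ l2, (a :: x :: xs).dropLast.getLast? = some l2 := by
      cases h : (a :: x :: xs).dropLast.getLast? with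
      | none =>
        rw [List.getLast?_eq_none_iff] at h
        have : (a :: x :: xs).dropLast = a :: (x :: xs).dropLast := by simp [List.dropLast]
        rw [this] at h
        exact absurd h (by simp)
      | some v => exact ⟨v, rfl⟩
    have g1 : PySem.List.pyGetD (a :: x :: xs) (-1) 0 = l1 := by
      rw [PySem.List.pyGetD_neg_one (a :: x :: xs) 0 hne]
      have h1' := h1
      rw [List.getLast?_eq_some_getLast hne] at h1'
      exact Option.some.inj h1'
    have g2 : PySem.List.pyGetD (a :: x :: xs) (-2) 0 = l2 := by
      have hlen : 2 ≤ (a :: x :: xs).length := by simp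
      rw [PySem.List.pyGetD_neg_ofNat (a :: x :: xs) 2 0 (by omega) hlen]
      have hd : (a :: x :: xs).dropLast.getLast? = (a :: x :: xs)[(a :: x :: xs).length - 2]? := by
        rw [List.getLast?_eq_getElem?, List.getElem?_dropLast, List.length_dropLast]
        rw [if_pos (by simp)]
        simp
      have h2' := h2
      rw [hd, List.getElem?_eq_getElem (by simp)] at h2'
      exact Option.some.inj h2'
    have hcore := core xs x a 1 [] [] ([], []) none l1 l2 ⟨rfl, Or.inl rfl⟩ h1 h2
    simp only [pick_peaks, pick_peaks_alt, slice_one_negone, List.tail_cons]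
    rw [hb, g1, g2]
    simp only [slice_dropLast]
    show [("pos", (endFix l2 l1 (loopA 1 a (x :: xs) ([], []))).1), ("peaks", (endFix l2 l1 (loopA 1 a (x :: xs) ([], []))).2)]
      = [("pos", (pick_peaks_loop 1 none [] [] a (x :: xs)).1), ("peaks", (pick_peaks_loop 1 none [] [] a (x :: xs)).2)]
    rw [hcore]
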